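-- pv_equiv track=rewrite | github.com/davidlimss/PKM_Pengasuh | app.py | format_topic_answer
-- ===== SOURCE A (Python) =====
-- from typing import List, Tuple, Optional, Dict, Any
--
-- def format_topic_answer(title: str, pasal_hits: List[Tuple[int, str]]) -> str:
--     if not pasal_hits:
--         return "Data tidak ditemukan pada dokumen yang dilatih."
--     seen = set()
--     uniq = []
--     for p, t in sorted(pasal_hits, key=lambda x: x[0]):
--         if p in seen:
--             continue
--         seen.add(p)
--         uniq.append((p, t))
--         if len(uniq) >= 5:
--             break
--
--     out = [f"**Aturan terkait {title} (ringkas):**\n"]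
--     for p, t in uniq:
--         short_text = t[:200].strip() + ("..." if len(t) > 200 else "")
--         out.append(f"- **Pasal {p}:** {short_text}")
--
--     out.append("\n*Ketik 'Pasal X' untuk melihat isi lengkap peraturannya.*")
--     return "\n".join(out)
-- ===== SOURCE B (Python) =====
-- def format_topic_answer(title, pasal_hits):
--     if not pasal_hits:
--         return "Data tidak ditemukan pada dokumen yang dilatih."
--     first_seen = {}
--     for p, t in pasal_hits:
--         first_seen.setdefault(p, t)
--     lines = [f"**Aturan terkait {title} (ringkas):**\n"]
--     for p in sorted(first_seen)[:5]:
--         t = first_seen[p]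
--         short_text = t[:200].strip() + ("..." if len(t) > 200 else "")
--         lines.append(f"- **Pasal {p}:** {short_text}")
--     lines.append("\n*Ketik 'Pasal X' untuk melihat isi lengkap peraturannya.*")
--     return "\n".join(lines)
-- ===== Notes on version B (the rewrite author's own statement) =====
-- stated objective: idiomatic
-- what changed: Instead of sorting the whole hit list and scanning it with a seen-set and an early break, B builds a first-seen dict in one pass (setdefault) and formats the first 5 of its sorted keys; the string assembly is unchanged.
import Mathlib
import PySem

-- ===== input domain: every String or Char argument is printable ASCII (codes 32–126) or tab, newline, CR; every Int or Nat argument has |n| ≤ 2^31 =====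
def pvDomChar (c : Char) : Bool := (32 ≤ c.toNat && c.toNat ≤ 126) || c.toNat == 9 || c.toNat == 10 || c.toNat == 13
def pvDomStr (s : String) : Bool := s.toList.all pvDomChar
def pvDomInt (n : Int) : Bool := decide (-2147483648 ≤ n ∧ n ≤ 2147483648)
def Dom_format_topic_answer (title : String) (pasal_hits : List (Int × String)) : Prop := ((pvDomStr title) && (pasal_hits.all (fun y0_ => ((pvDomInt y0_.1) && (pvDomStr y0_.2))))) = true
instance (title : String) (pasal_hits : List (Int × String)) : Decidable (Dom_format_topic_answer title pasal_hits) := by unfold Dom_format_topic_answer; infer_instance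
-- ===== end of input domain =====

-- B replaces A's sort-then-scan dedup with a first-seen dict built in one pass plus a sort of the distinct keys (idiomatic).


-- ===== PORT A =====
-- the 'for p, t in sorted(...)' loop with the 'continue' / 'break' at len(uniq) >= 5
def pvUniqLoopA : List (Int × String) → PySem.Set Int → List (Int × String) → List (Int × String)
  | [], _, uniq => uniq
  | (p, t) :: rest, seen, uniq =>
    if PySem.Set.contains seen p then pvUniqLoopA rest seen uniq
    else
      let uniq' := uniq ++ [(p, t)]
      if 5 ≤ uniq'.length then uniq'
      else pvUniqLoopA rest (PySem.Set.add seen p) uniq'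

def format_topic_answer (title : String) (pasal_hits : List (Int × String)) : String :=
  if pasal_hits = [] then "Data tidak ditemukan pada dokumen yang dilatih."
  else
    let uniq := pvUniqLoopA (PySem.List.sorted pasal_hits (fun x => x.1)) PySem.Set.empty []
    let out := uniq.foldl
      (fun out x => out ++ ["- **Pasal " ++ PySem.Int.toStr x.1 ++ ":** " ++
        (PySem.Str.strip (PySem.Str.slice x.2 none (some 200)) ++
          (if 200 < PySem.Str.len x.2 then "..." else ""))])
      ["**Aturan terkait " ++ title ++ " (ringkas):**\n"]
    PySem.Str.join "\n" (out ++ ["\n*Ketik 'Pasal X' untuk melihat isi lengkap peraturannya.*"])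

-- ===== PORT B =====
-- t[:200].strip() + ("..." if len(t) > 200 else "")
def pvShortB (t : String) : String :=
  PySem.Str.strip (PySem.Str.slice t none (some 200)) ++ (if 200 < PySem.Str.len t then "..." else "")

def format_topic_answer_alt (title : String) (pasal_hits : List (Int × String)) : String :=
  if pasal_hits = [] then "Data tidak ditemukan pada dokumen yang dilatih."
  else
    let first_seen := pasal_hits.foldl (fun d x => d.setdefault x.1 x.2) PySem.Dict.empty
    let lines := ["**Aturan terkait " ++ title ++ " (ringkas):**\n"]
      ++ ((PySem.List.sorted first_seen.keys (fun k => k)).take 5).map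
           (fun p => "- **Pasal " ++ PySem.Int.toStr p ++ ":** " ++ pvShortB (first_seen.getD p ""))
      ++ ["\n*Ketik 'Pasal X' untuk melihat isi lengkap peraturannya.*"]
    PySem.Str.join "\n" lines

-- ===== PRECONDITION & SPEC =====
def Spec_format_topic_answer (title : String) (pasal_hits : List (Int × String)) (out : String) : Prop := out = format_topic_answer_alt title pasal_hits
instance (title : String) (pasal_hits : List (Int × String)) (out : String) : Decidable (Spec_format_topic_answer title pasal_hits out) := by unfold Spec_format_topic_answer; infer_instance

-- ===== CLAIM (what is proved, stated in full; the proofs are below) =====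
def Claim_equal_format_topic_answer : Prop := ∀ (title : String) (pasal_hits : List (Int × String)), Dom_format_topic_answer title pasal_hits → Spec_format_topic_answer title pasal_hits (format_topic_answer title pasal_hits)

-- ===== LEMMAS AND PROOFS =====

theorem pvContains_true {s : PySem.Set Int} {x : Int} (h : x ∈ s) : PySem.Set.contains s x = true :=
  (PySem.Set.contains_iff s x).mpr h

theorem pvContains_false {s : PySem.Set Int} {x : Int} (h : x ∉ s) : PySem.Set.contains s x = false :=
  Bool.eq_false_iff.mpr (fun hc => h ((PySem.Set.contains_iff s x).mp hc))

theorem pvNotMem_add {s : PySem.Set Int} {x y : Int} (h1 : y ∉ s) (h2 : y ≠ x) : y ∉ PySem.Set.add s x := by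
  rw [PySem.Set.mem_add]
  rintro (h | h)
  · exact h1 h
  · exact h2 h

-- first-occurrence-per-key dedup, the pure shape of A's scan (proof helper)
def pvDedupF (seen : PySem.Set Int) : List (Int × String) → List (Int × String)
  | [] => []
  | (p, t) :: rest =>
    if PySem.Set.contains seen p then pvDedupF seen rest
    else (p, t) :: pvDedupF (PySem.Set.add seen p) rest

theorem pvUniqLoopA_eq (xs : List (Int × String)) : ∀ (seen : PySem.Set Int) (acc : List (Int × String)),
    acc.length < 5 → pvUniqLoopA xs seen acc = (acc ++ pvDedupF seen xs).take 5 := by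
  induction xs with
  | nil =>
    intro seen acc h
    simp only [pvUniqLoopA, pvDedupF, List.append_nil]
    rw [List.take_of_length_le (le_of_lt h)]
  | cons x rest ih =>
    intro seen acc h
    obtain ⟨p, t⟩ := x
    simp only [pvUniqLoopA, pvDedupF]
    by_cases hs : p ∈ seen
    · simp only [pvContains_true hs, if_true]
      exact ih seen acc h
    · simp only [pvContains_false hs, Bool.false_eq_true, if_false]
      by_cases h5 : 5 ≤ (acc ++ [(p, t)]).length
      · simp only [h5, if_true]
        have hlen : acc.length = 4 := by simp at h5; omega
        rw [List.take_append, List.take_of_length_le (by omega : acc.length ≤ 5),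
            (by omega : 5 - acc.length = 1)]
        simp
      · simp only [h5, if_false]
        rw [ih (PySem.Set.add seen p) (acc ++ [(p, t)]) (by simp at h5 ⊢; omega)]
        simp

theorem pvDedupF_mem : ∀ (ys : List (Int × String)) (seen : PySem.Set Int) (x : Int × String),
    x ∈ pvDedupF seen ys → x ∈ ys ∧ x.1 ∉ seen := by
  intro ys
  induction ys with
  | nil => intro seen x hx; simp [pvDedupF] at hx
  | cons y rest ih =>
    intro seen x hx
    obtain ⟨p, t⟩ := y
    simp only [pvDedupF] at hx
    by_cases hs : p ∈ seen
    · rw [pvContains_true hs, if_pos rfl] at hx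
      rcases ih seen x hx with ⟨h1, h2⟩
      exact ⟨List.mem_cons_of_mem _ h1, h2⟩
    · rw [pvContains_false hs] at hx
      simp only [Bool.false_eq_true, if_false, List.mem_cons] at hx
      rcases hx with rfl | hx
      · exact ⟨List.mem_cons_self, hs⟩
      · rcases ih _ x hx with ⟨h1, h2⟩
        refine ⟨List.mem_cons_of_mem _ h1, fun hc => h2 ?_⟩
        rw [PySem.Set.mem_add]
        exact Or.inl hc

theorem pvDedupF_mem_keys : ∀ (ys : List (Int × String)) (seen : PySem.Set Int) (p : Int),
    p ∈ ys.map (·.1) → p ∉ seen → p ∈ (pvDedupF seen ys).map (·.1) := by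
  intro ys
  induction ys with
  | nil => intro seen p h _; simp at h
  | cons y rest ih =>
    intro seen p h hc
    obtain ⟨q, u⟩ := y
    simp only [List.map_cons, List.mem_cons] at h
    simp only [pvDedupF]
    by_cases hs : q ∈ seen
    · rw [pvContains_true hs, if_pos rfl]
      rcases h with rfl | h
      · exact absurd hs hc
      · exact ih seen p h hc
    · rw [pvContains_false hs]
      simp only [Bool.false_eq_true, if_false, List.map_cons, List.mem_cons]
      rcases h with rfl | h
      · exact Or.inl rfl
      · by_cases hpq : p = q
        · exact Or.inl hpq
        · exact Or.inr (ih _ p h (pvNotMem_add hc hpq))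

theorem pvDedupF_find? : ∀ (ys : List (Int × String)) (seen : PySem.Set Int) (p : Int) (t : String),
    (p, t) ∈ pvDedupF seen ys → ys.find? (fun q => q.1 == p) = some (p, t) := by
  intro ys
  induction ys with
  | nil => intro seen p t h; simp [pvDedupF] at h
  | cons y rest ih =>
    intro seen p t h
    obtain ⟨q, u⟩ := y
    simp only [pvDedupF] at h
    by_cases hs : q ∈ seen
    · rw [pvContains_true hs, if_pos rfl] at h
      have hne : q ≠ p := by
        intro he; subst he
        exact (pvDedupF_mem rest seen (q, t) h).2 hs
      rw [List.find?_cons_of_neg (by simpa using hne)]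
      exact ih seen p t h
    · rw [pvContains_false hs] at h
      simp only [Bool.false_eq_true, if_false, List.mem_cons] at h
      rcases h with he | h
      · rw [Prod.mk.injEq] at he
        obtain ⟨rfl, rfl⟩ := he
        exact List.find?_cons_of_pos (by simp)
      · have hne : q ≠ p := by
          intro he; subst he
          exact (pvDedupF_mem rest _ (q, t) h).2 (by rw [PySem.Set.mem_add]; exact Or.inr rfl)
        rw [List.find?_cons_of_neg (by simpa using hne)]
        exact ih _ p t h

theorem pvDedupF_nodup_keys : ∀ (ys : List (Int × String)) (seen : PySem.Set Int),
    ((pvDedupF seen ys).map (·.1)).Nodup := by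
  intro ys
  induction ys with
  | nil => intro seen; simp [pvDedupF]
  | cons y rest ih =>
    intro seen
    obtain ⟨p, t⟩ := y
    simp only [pvDedupF]
    by_cases hs : p ∈ seen
    · rw [pvContains_true hs, if_pos rfl]; exact ih seen
    · rw [pvContains_false hs]
      simp only [Bool.false_eq_true, if_false, List.map_cons, List.nodup_cons]
      refine ⟨?_, ih _⟩
      intro hmem
      rcases List.mem_map.mp hmem with ⟨x, hx, hx1⟩
      exact (pvDedupF_mem rest _ x hx).2 (hx1 ▸ (by rw [PySem.Set.mem_add]; exact Or.inr rfl))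

theorem pvDedupF_pairwise : ∀ (ys : List (Int × String)) (seen : PySem.Set Int),
    ys.Pairwise (fun a b => a.1 ≤ b.1) → (pvDedupF seen ys).Pairwise (fun a b => a.1 < b.1) := by
  intro ys
  induction ys with
  | nil => intro seen _; simp [pvDedupF]
  | cons y rest ih =>
    intro seen hp
    obtain ⟨p, t⟩ := y
    rcases List.pairwise_cons.mp hp with ⟨hhead, htail⟩
    simp only [pvDedupF]
    by_cases hs : p ∈ seen
    · rw [pvContains_true hs, if_pos rfl]; exact ih seen htail
    · rw [pvContains_false hs]
      simp only [Bool.false_eq_true, if_false, List.pairwise_cons]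
      refine ⟨?_, ih _ htail⟩
      intro x hx
      rcases pvDedupF_mem rest _ x hx with ⟨hmem, hnc⟩
      have hne : x.1 ≠ p := fun he => hnc (by rw [PySem.Set.mem_add]; exact Or.inr he)
      exact lt_of_le_of_ne (hhead x hmem) (Ne.symm hne)

-- one insertion step of Python's stable sort, seen through a fixed-key filter
theorem pvInsertBy_filter (x : Int × String) (p : Int) : ∀ (acc : List (Int × String)),
    acc.Pairwise (fun a b => a.1 ≤ b.1) →
    (PySem.List.insertBy (fun a b => decide (a.1 < b.1)) x acc).filter (fun q => q.1 == p)
      = if x.1 = p then acc.filter (fun q => q.1 == p) ++ [x] else acc.filter (fun q => q.1 == p) := by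
  intro acc
  induction acc with
  | nil =>
    intro _
    by_cases hx : x.1 = p <;> simp [PySem.List.insertBy, List.filter, hx]
  | cons y ys ih =>
    intro hp
    rcases List.pairwise_cons.mp hp with ⟨hhead, htail⟩
    simp only [PySem.List.insertBy]
    by_cases hlt : x.1 < y.1
    · simp only [hlt, decide_true, if_true]
      by_cases hx : x.1 = p
      · subst hx
        have hfe : (y :: ys).filter (fun q => q.1 == x.1) = [] := by
          rw [List.filter_eq_nil_iff]
          intro a ha
          rcases List.mem_cons.mp ha with rfl | ha
          · simp; omega
          · have := hhead a ha; simp; omega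
        simp [hfe]
      · simp [List.filter_cons, hx]
    · simp only [hlt, decide_false, Bool.false_eq_true, if_false]
      rw [List.filter_cons, List.filter_cons]
      by_cases hy : y.1 = p
      · simp only [hy, beq_self_eq_true, if_true]
        rw [ih htail]
        split <;> rfl
      · simp only [beq_eq_false_iff_ne.mpr hy, Bool.false_eq_true, if_false]
        rw [ih htail]

-- Python's sort is stable: elements with a fixed key keep their relative (and absolute first) position
theorem pvSorted_filter (l : List (Int × String)) (p : Int) :
    (PySem.List.sorted l (fun x => x.1)).filter (fun q => q.1 == p) = l.filter (fun q => q.1 == p) := by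
  induction l using List.reverseRecOn with
  | nil => simp [PySem.List.sorted_eq_foldl_insertBy]
  | append_singleton l x ih =>
    rw [PySem.List.sorted_eq_foldl_insertBy, List.foldl_append, List.foldl_cons, List.foldl_nil,
        ← PySem.List.sorted_eq_foldl_insertBy]
    rw [pvInsertBy_filter x p _ (PySem.List.sorted_pairwise l (fun x => x.1))]
    rw [ih, List.filter_append]
    by_cases hx : x.1 = p
    · simp [hx, List.filter]
    · have hb : (x.1 == p) = false := by simpa using hx
      simp [hb, List.filter, hx]

theorem pvSorted_find? (l : List (Int × String)) (p : Int) :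
    (PySem.List.sorted l (fun x => x.1)).find? (fun q => q.1 == p) = l.find? (fun q => q.1 == p) := by
  rw [← List.head?_filter, ← List.head?_filter, pvSorted_filter]

theorem pvFold_get? : ∀ (l : List (Int × String)) (d : PySem.Dict Int String) (p : Int),
    (l.foldl (fun d x => d.setdefault x.1 x.2) d).get? p
      = (d.get? p).or ((l.find? (fun q => q.1 == p)).map (·.2)) := by
  intro l
  induction l with
  | nil => intro d p; simp
  | cons x rest ih =>
    intro d p
    obtain ⟨q, u⟩ := x
    rw [List.foldl_cons, ih]
    by_cases hpq : p = q
    · subst hpq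
      rw [PySem.Dict.get?_setdefault_self]
      rw [List.find?_cons_of_pos (by simp)]
      cases hd : d.get? p <;> simp
    · rw [PySem.Dict.get?_setdefault_of_ne _ _ hpq]
      rw [List.find?_cons_of_neg (by simpa using fun h => hpq h.symm)]

theorem pvFold_keys : ∀ (l : List (Int × String)) (d : PySem.Dict Int String),
    (l.foldl (fun d x => d.setdefault x.1 x.2) d).keys = PySem.Set.update d.keys (l.map (·.1)) := by
  intro l
  induction l with
  | nil => intro d; simp [PySem.Set.update]
  | cons x rest ih =>
    intro d
    rw [List.foldl_cons, ih, List.map_cons, PySem.Set.update_cons]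
    congr 1
    rw [PySem.Dict.keys_setdefault]
    by_cases hm : x.1 ∈ d.keys
    · rw [if_pos (by rw [PySem.Dict.contains_iff_mem_keys]; exact hm), PySem.Set.add_of_mem hm]
    · rw [if_neg (by rw [PySem.Dict.contains_iff_mem_keys]; exact hm), PySem.Set.add_of_not_mem hm]

-- the central fact: A's truncated dedup-of-sorted list equals B's sorted-keys view of the dict
theorem pvMain (hits : List (Int × String)) :
    pvUniqLoopA (PySem.List.sorted hits (fun x => x.1)) PySem.Set.empty []
      = ((PySem.List.sorted (hits.foldl (fun d x => d.setdefault x.1 x.2) PySem.Dict.empty).keys (fun k => k)).take 5).map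
          (fun p => (p, (hits.foldl (fun d x => d.setdefault x.1 x.2) PySem.Dict.empty).getD p "")) := by
  set ys := PySem.List.sorted hits (fun x => x.1) with hys
  set d := hits.foldl (fun d x => d.setdefault x.1 x.2) PySem.Dict.empty with hd
  have hkeys : d.keys = PySem.Set.ofList (hits.map (·.1)) := by
    rw [hd, pvFold_keys]
    simp [PySem.Set.update_nil_left, PySem.Dict.empty]
  have hgetD : ∀ x ∈ pvDedupF PySem.Set.empty ys, d.getD x.1 "" = x.2 := by
    intro x hx
    obtain ⟨p, t⟩ := x
    have h1 := pvDedupF_find? ys PySem.Set.empty p t hx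
    rw [hys, pvSorted_find?] at h1
    apply PySem.Dict.getD_of_get?_eq_some
    rw [hd, pvFold_get?, h1]
    simp
  have hsorted : PySem.List.sorted d.keys (fun k => k) = (pvDedupF PySem.Set.empty ys).map (·.1) := by
    apply PySem.List.sorted_eq_of_perm_of_pairwise_lt
    · rw [List.perm_ext_iff_of_nodup (pvDedupF_nodup_keys ys _) (by rw [hkeys]; exact PySem.Set.nodup_ofList _)]
      intro a
      rw [hkeys, PySem.Set.mem_ofList]
      have hperm : (ys.map (·.1)).Perm (hits.map (·.1)) := (PySem.List.sorted_perm hits (fun x => x.1) false).map _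
      constructor
      · intro ha
        rcases List.mem_map.mp ha with ⟨x, hx, hx1⟩
        exact hperm.mem_iff.mp (hx1 ▸ List.mem_map_of_mem (pvDedupF_mem ys _ x hx).1)
      · intro ha
        exact pvDedupF_mem_keys ys PySem.Set.empty a (hperm.mem_iff.mpr ha) (by simp [PySem.Set.empty])
    · exact List.pairwise_map.mpr (pvDedupF_pairwise ys _ (hys ▸ PySem.List.sorted_pairwise hits (fun x => x.1)))
  rw [pvUniqLoopA_eq ys PySem.Set.empty [] (by simp), List.nil_append, hsorted, ← List.map_take, List.map_map]
  have : ∀ x ∈ (pvDedupF PySem.Set.empty ys).take 5,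
      ((fun p => (p, d.getD p "")) ∘ (·.1)) x = id x := by
    intro x hx
    have := hgetD x (List.mem_of_mem_take hx)
    simp [Function.comp, this]
  rw [List.map_congr_left this, List.map_id]

-- ===== VERDICT (by name: the statement is the Claim_ definition above) =====
theorem format_topic_answer_spec : Claim_equal_format_topic_answer := by
  intro title hits _
  unfold Spec_format_topic_answer format_topic_answer format_topic_answer_alt
  by_cases h : hits = []
  · simp [h]
  · simp only [h, if_false]
    simp only [PySem.List.foldl_append_singleton_eq_map]
    rw [pvMain hits]
    simp [List.map_map, List.map_take, pvShortB, Function.comp_def]
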